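-- pv_equiv track=rewrite | github.com/Shimpeioto/X-agents | scripts/outbound_history.py | check_tweets
-- ===== SOURCE A (Python) =====
-- def check_tweets(rows, tweet_ids):
--     """Check which tweet IDs have already been liked."""
--     liked = set()
--     for row in rows:
--         if row.get("action_type") == "like" and row.get("target_tweet_id"):
--             liked.add(row["target_tweet_id"])
--
--     lines = ["=== Tweet Deduplication Check ==="]
--     for tid in tweet_ids:
--         status = "ALREADY LIKED" if tid in liked else "not liked"
--         lines.append(f"  {tid}: {status}")
--     return "\n".join(lines)
-- ===== SOURCE B (Python) =====
-- def check_tweets(rows, tweet_ids):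
--     """Check which tweet IDs have already been liked."""
--     return "\n".join(
--         ["=== Tweet Deduplication Check ==="]
--         + [
--             "  {}: {}".format(
--                 tid,
--                 "ALREADY LIKED"
--                 if any(
--                     r.get("action_type") == "like"
--                     and r.get("target_tweet_id")
--                     and r["target_tweet_id"] == tid
--                     for r in rows
--                 )
--                 else "not liked",
--             )
--             for tid in tweet_ids
--         ]
--     )
-- ===== Notes on version B (the rewrite author's own statement) =====
-- stated objective: alternative
-- what changed: Replaces the precomputed liked-set plus membership lookups with a single join over a comprehension that decides each tweet id by an any() scan of the rows.
import Mathlib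
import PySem

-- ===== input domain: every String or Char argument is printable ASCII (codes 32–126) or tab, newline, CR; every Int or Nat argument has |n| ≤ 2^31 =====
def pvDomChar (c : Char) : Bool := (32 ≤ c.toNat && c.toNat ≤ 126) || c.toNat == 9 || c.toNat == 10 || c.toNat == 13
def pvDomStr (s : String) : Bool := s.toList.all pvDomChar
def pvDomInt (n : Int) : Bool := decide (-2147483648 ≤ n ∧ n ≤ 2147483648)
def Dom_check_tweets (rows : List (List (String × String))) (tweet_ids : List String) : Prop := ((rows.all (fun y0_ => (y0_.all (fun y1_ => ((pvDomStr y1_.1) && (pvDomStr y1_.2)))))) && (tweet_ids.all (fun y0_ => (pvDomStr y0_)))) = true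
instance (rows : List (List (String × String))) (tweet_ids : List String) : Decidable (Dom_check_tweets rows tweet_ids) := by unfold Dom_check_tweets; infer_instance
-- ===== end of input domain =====

-- B replaces A's precomputed liked-set with a per-id any() scan over the rows (alternative decomposition).

-- row.get(k) on the association-list dict
def rowGet? (row : List (String × String)) (k : String) : Option String :=
  (PySem.Dict.mk row).get? k

-- ===== PORT A =====
def check_tweets (rows : List (List (String × String))) (tweet_ids : List String) : String :=
  let liked : PySem.Set String :=
    rows.foldl (fun s row =>
      if rowGet? row "action_type" == some "like" && !((rowGet? row "target_tweet_id").getD "" == "")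
      then PySem.Set.add s ((rowGet? row "target_tweet_id").getD "")
      else s) PySem.Set.empty
  let lines : List String :=
    tweet_ids.foldl (fun ls tid =>
      ls ++ ["  " ++ tid ++ ": " ++ (if PySem.Set.contains liked tid then "ALREADY LIKED" else "not liked")])
      ["=== Tweet Deduplication Check ==="]
  PySem.Str.join "\n" lines

-- ===== PORT B =====
def check_tweets_alt (rows : List (List (String × String))) (tweet_ids : List String) : String :=
  PySem.Str.join "\n"
    ("=== Tweet Deduplication Check ===" ::
      tweet_ids.map (fun tid =>
        "  " ++ tid ++ ": " ++
          (if rows.any (fun row =>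
              rowGet? row "action_type" == some "like"
              && !((rowGet? row "target_tweet_id").getD "" == "")
              && (rowGet? row "target_tweet_id").getD "" == tid)
           then "ALREADY LIKED" else "not liked")))

-- ===== PRECONDITION & SPEC =====
def Spec_check_tweets (rows : List (List (String × String))) (tweet_ids : List String) (out : String) : Prop := out = check_tweets_alt rows tweet_ids
instance (rows : List (List (String × String))) (tweet_ids : List String) (out : String) : Decidable (Spec_check_tweets rows tweet_ids out) := by unfold Spec_check_tweets; infer_instance

-- ===== CLAIM (what is proved, stated in full; the proofs are below) =====
def Claim_equal_check_tweets : Prop := ∀ (rows : List (List (String × String))) (tweet_ids : List String), Dom_check_tweets rows tweet_ids → Spec_check_tweets rows tweet_ids (check_tweets rows tweet_ids)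

-- ===== LEMMAS AND PROOFS =====

-- membership in the set built by A's loop = B's any-scan (with any accumulator)
theorem contains_foldl_add {α : Type} [DecidableEq α]
    (p : α → Bool) : ∀ (rows : List α) (s : PySem.Set String)
    (v : α → String) (tid : String),
    PySem.Set.contains (rows.foldl (fun s row => if p row then PySem.Set.add s (v row) else s) s) tid
      = (PySem.Set.contains s tid || rows.any (fun row => p row && v row == tid)) := by
  intro rows
  induction rows with
  | nil => intro s v tid; simp
  | cons r rest ih =>
    intro s v tid
    simp only [List.foldl_cons, List.any_cons]
    by_cases hp : p r = true
    · rw [if_pos hp, ih]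
      have hc : (PySem.Set.add s (v r)).contains tid = (s.contains tid || (v r == tid)) := by
        simp only [PySem.Set.add]
        by_cases he : v r = tid
        · subst he
          split_ifs with h
          · have hm : v r ∈ s := List.mem_of_elem_eq_true h
            simp [hm]
          · simp
        · split_ifs with h <;> simp [he, Ne.symm he]
      rw [hc]
      simp [hp, Bool.or_assoc]
    · rw [if_neg hp, ih]
      simp [hp]

-- A's line loop appends; unrolled it is the header plus a map
theorem foldl_lines (f : String → String) :
    ∀ (tids : List String) (init : List String),
    tids.foldl (fun ls tid => ls ++ [f tid]) init = init ++ tids.map f := by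
  intro tids
  induction tids with
  | nil => intro init; simp
  | cons t rest ih => intro init; simp [List.foldl_cons, ih]

theorem check_tweets_eq (rows : List (List (String × String))) (tweet_ids : List String) :
    check_tweets rows tweet_ids = check_tweets_alt rows tweet_ids := by
  simp only [check_tweets, check_tweets_alt]
  congr 1
  rw [foldl_lines]
  simp only [List.singleton_append, List.cons.injEq, true_and]
  apply List.map_congr_left
  intro tid _
  congr 1
  congr 1
  rw [contains_foldl_add
    (p := fun row => rowGet? row "action_type" == some "like" && !((rowGet? row "target_tweet_id").getD "" == ""))
    (v := fun row => (rowGet? row "target_tweet_id").getD "")]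
  simp [PySem.Set.empty, Bool.and_assoc]

-- ===== VERDICT (by name: the statement is the Claim_ definition above) =====
theorem check_tweets_spec : Claim_equal_check_tweets := by
  intro rows tweet_ids _
  unfold Spec_check_tweets
  exact check_tweets_eq rows tweet_ids
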